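-- pv_equiv track=rewrite | github.com/MortyTeeth/steps-in-python | Course_3_Programming_High_Level/repetition_of_basic_structures_1/filter_anagrams_6.py | filter_anagrams
-- ===== SOURCE A (Python) =====
-- def filter_anagrams(word, words):
--     anagrams = [str(i) for i in word]
--     after_comparison = []
--     for i in words:
--         vr = [str(k) for k in i]
--         if sorted(anagrams) == sorted(vr):
--             after_comparison.append(i)
--     return after_comparison
-- ===== SOURCE B (Python) =====
-- def filter_anagrams(word, words):
--     def _counts(s):
--         d = {}
--         for k in s:
--             c = str(k)
--             d[c] = d.get(c, 0) + 1
--         return d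
--     target = _counts(word)
--     return [i for i in words if _counts(i) == target]
-- ===== Notes on version B (the rewrite author's own statement) =====
-- stated objective: faster
-- what changed: Replaces per-word sort-and-compare (and re-sorting the target's character list on every iteration) with a character-frequency dict built once for the target and once per candidate, compared for equality.
import Mathlib
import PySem

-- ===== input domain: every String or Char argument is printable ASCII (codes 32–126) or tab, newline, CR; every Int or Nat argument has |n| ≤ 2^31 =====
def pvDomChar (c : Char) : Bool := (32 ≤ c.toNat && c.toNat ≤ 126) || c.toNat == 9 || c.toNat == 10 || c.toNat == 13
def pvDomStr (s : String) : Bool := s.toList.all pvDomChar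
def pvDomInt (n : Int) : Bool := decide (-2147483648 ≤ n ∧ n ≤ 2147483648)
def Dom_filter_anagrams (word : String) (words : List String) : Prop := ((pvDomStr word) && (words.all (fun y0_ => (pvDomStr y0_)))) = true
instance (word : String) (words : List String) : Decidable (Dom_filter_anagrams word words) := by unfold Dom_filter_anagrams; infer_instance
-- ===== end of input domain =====

-- B replaces A's per-candidate sort-and-compare with a character-frequency dict
-- (built once for the target word, once per candidate) compared for equality; timed faster at large sizes.


-- ===== PORT A =====
-- str(i) on a character i is the one-character string
def filter_anagrams (word : String) (words : List String) : List String :=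
  let anagrams := word.toList.map (fun i => String.ofList [i])
  words.foldl (fun acc i =>
    let vr := i.toList.map (fun k => String.ofList [k])
    if (PySem.List.sorted anagrams (fun x => x)) = (PySem.List.sorted vr (fun x => x))
    then acc ++ [i] else acc) []

-- ===== PORT B =====
-- B's helper _counts: a dict mapping str(k) to its number of occurrences (d[c] = d.get(c, 0) + 1)
def pvCounts (s : String) : PySem.Dict String Int :=
  s.toList.foldl (fun d k =>
    let c := String.ofList [k]
    d.insert c (d.getD c 0 + 1)) PySem.Dict.empty

-- Python's `==` on two dicts: same key set, same value at every key (insertion order ignored)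
def pvDictEq (d1 d2 : PySem.Dict String Int) : Bool :=
  PySem.Set.equal d1.keys d2.keys && d1.keys.all (fun k => d1.get? k == d2.get? k)

def filter_anagrams_alt (word : String) (words : List String) : List String :=
  let target := pvCounts word
  words.filter (fun i => pvDictEq (pvCounts i) target)

-- ===== PRECONDITION & SPEC =====
def Spec_filter_anagrams (word : String) (words : List String) (out : List String) : Prop := out = filter_anagrams_alt word words
instance (word : String) (words : List String) (out : List String) : Decidable (Spec_filter_anagrams word words out) := by unfold Spec_filter_anagrams; infer_instance

-- ===== CLAIM (what is proved, stated in full; the proofs are below) =====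
def Claim_equal_filter_anagrams : Prop := ∀ (word : String) (words : List String), Dom_filter_anagrams word words → Spec_filter_anagrams word words (filter_anagrams word words)

-- ===== LEMMAS AND PROOFS =====

theorem pvCounts_eq_counter (s : String) :
    pvCounts s = PySem.Dict.counter (s.toList.map (fun c => String.ofList [c])) := by
  rw [← PySem.Dict.foldl_insert_getD_add_one_eq_counter, List.foldl_map]
  rfl

theorem get?_counter_eq (xs : List String) (k : String) :
    (PySem.Dict.counter xs).get? k = if k ∈ xs then some ((xs.count k : Int)) else none := by
  by_cases h : k ∈ xs
  · simp only [h, if_pos]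
    have hmem : k ∈ (PySem.Dict.counter xs).keys := by
      rw [PySem.Dict.keys_counter, PySem.Set.mem_ofList]; exact h
    cases hg : (PySem.Dict.counter xs).get? k with
    | none => exact absurd ((PySem.Dict.get?_eq_none_iff_not_mem_keys _ _).mp hg) (not_not_intro hmem)
    | some v =>
      have := PySem.Dict.getD_counter xs k
      rw [PySem.Dict.getD_eq_get?_getD, hg] at this
      simp at this
      rw [this]
  · simp only [h, if_neg, not_false_iff]
    rw [PySem.Dict.get?_eq_none_iff_not_mem_keys, PySem.Dict.keys_counter, PySem.Set.mem_ofList]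
    exact h

theorem pvDictEq_counter_iff (xs ys : List String) :
    pvDictEq (PySem.Dict.counter xs) (PySem.Dict.counter ys) = true ↔ xs.Perm ys := by
  rw [List.perm_iff_count]
  unfold pvDictEq
  simp only [Bool.and_eq_true, PySem.Set.equal_iff, List.all_eq_true, beq_iff_eq,
    PySem.Dict.keys_counter, PySem.Set.mem_ofList]
  constructor
  · rintro ⟨hkeys, hvals⟩ v
    by_cases h : v ∈ xs
    · have := hvals v h
      rw [get?_counter_eq, get?_counter_eq, if_pos h, if_pos ((hkeys v).mp h)] at this
      exact_mod_cast Option.some.inj this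
    · have h' : v ∉ ys := fun hy => h ((hkeys v).mpr hy)
      rw [List.count_eq_zero_of_not_mem h, List.count_eq_zero_of_not_mem h']
  · intro hcnt
    have hmem : ∀ v, v ∈ xs ↔ v ∈ ys := by
      intro v
      rw [← List.count_pos_iff, ← List.count_pos_iff, hcnt v]
    refine ⟨hmem, fun k _ => ?_⟩
    rw [get?_counter_eq, get?_counter_eq, hcnt k]
    by_cases h : k ∈ xs
    · rw [if_pos h, if_pos ((hmem k).mp h)]
    · rw [if_neg h, if_neg (fun hy => h ((hmem k).mpr hy))]

theorem filter_anagrams_eq (word : String) (words : List String) :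
    filter_anagrams word words = filter_anagrams_alt word words := by
  unfold filter_anagrams filter_anagrams_alt
  rw [PySem.List.foldl_append_ite_eq_filter, List.nil_append]
  apply List.filter_congr
  intro i _
  rw [pvCounts_eq_counter, pvCounts_eq_counter, Bool.eq_iff_iff, decide_eq_true_eq,
    pvDictEq_counter_iff, PySem.List.sorted_id_eq_sorted_id_iff_perm]
  exact ⟨List.Perm.symm, List.Perm.symm⟩

-- ===== VERDICT (by name: the statement is the Claim_ definition above) =====
theorem filter_anagrams_spec : Claim_equal_filter_anagrams := by
  intro word words _
  unfold Spec_filter_anagrams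
  exact filter_anagrams_eq word words
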